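-- pv_equiv track=rewrite | github.com/wzygxr/shuati | class142_Binomial_Inversion/Code01_Derangement.py | derangement_optimized
-- ===== SOURCE A (Python) =====
-- MOD = 10**9 + 7  # 模数
--
-- def derangement_optimized(n: int) -> int:
--     """
--     计算错排数 - 空间优化的动态规划方法
--
--     算法原理：基于递推式，但只保存前两个状态
--
--     时间复杂度：O(n)
--     空间复杂度：O(1) - 只需要常数级额外空间
--
--     Args:
--         n: 元素个数
--
--     Returns:
--         n个元素的错排数，结果对MOD取模
--
--     Raises:
--         ValueError: 当n为负数时抛出异常
--     """
--     if n < 0: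
--         raise ValueError("输入必须是非负整数")
--     if n == 0:
--         return 1
--     if n == 1:
--         return 0
--
--     # 只需要保存前两个状态
--     a = 1  # dp[0]
--     b = 0  # dp[1]
--     res = 0
--
--     for i in range(2, n + 1):
--         res = (i - 1) * (a + b) % MOD
--
--         # 更新状态
--         a, b = b, res
--
--     return res
-- ===== SOURCE B (Python) =====
-- MOD = 10**9 + 7  # 模数
--
-- def derangement_optimized(n: int) -> int:
--     """错排数：单状态递推 D(i) = i*D(i-1) + (-1)^i (mod MOD)。"""
--     if n < 0:
--         raise ValueError("输入必须是非负整数")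
--     prev = 1  # D(0)
--     for i in range(1, n + 1):
--         prev = (i * prev + (1 if i % 2 == 0 else MOD - 1)) % MOD
--     return prev
-- ===== Notes on version B (the rewrite author's own statement) =====
-- stated objective: simpler
-- what changed: Replaces the two-state recurrence D(n)=(n-1)(D(n-1)+D(n-2)) with the single-state recurrence D(n)=n*D(n-1)+(-1)^n, keeping one running value instead of two previous states and needing no n==1 special case.
import Mathlib
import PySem

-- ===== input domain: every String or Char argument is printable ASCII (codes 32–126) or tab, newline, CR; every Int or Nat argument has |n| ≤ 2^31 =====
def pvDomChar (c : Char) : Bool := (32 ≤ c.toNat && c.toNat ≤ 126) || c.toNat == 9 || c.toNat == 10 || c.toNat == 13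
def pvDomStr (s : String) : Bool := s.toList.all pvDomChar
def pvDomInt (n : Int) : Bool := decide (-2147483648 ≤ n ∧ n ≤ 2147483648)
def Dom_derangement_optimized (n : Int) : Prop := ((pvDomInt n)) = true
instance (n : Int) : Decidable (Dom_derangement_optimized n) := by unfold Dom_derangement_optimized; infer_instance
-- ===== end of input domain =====

-- B replaces A's two-state recurrence by the single-state recurrence D(n)=n*D(n-1)+(-1)^n (objective: simpler).

def MOD : Int := 10 ^ 9 + 7  -- 模数

-- ===== PORT A =====
-- loop body of A: state (a, b, res); res = (i-1)*(a+b) % MOD; a, b = b, res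
def pvStepA (st : Int × Int × Int) (i : Int) : Int × Int × Int :=
  let res := (i - 1) * (st.1 + st.2.1) % MOD
  (st.2.1, res, res)

def derangement_optimized (n : Int) : Int :=
  if n < 0 then 0  -- Python raises ValueError here; excluded by Pre_
  else if n = 0 then 1
  else if n = 1 then 0
  else ((PySem.List.pyRange 2 (n + 1) 1).foldl pvStepA (1, 0, 0)).2.2

-- ===== PORT B =====
-- loop body of B: prev = (i*prev + (1 if i % 2 == 0 else MOD - 1)) % MOD
def pvStepB (prev : Int) (i : Int) : Int :=
  (i * prev + (if i % 2 = 0 then 1 else MOD - 1)) % MOD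

def derangement_optimized_alt (n : Int) : Int :=
  if n < 0 then 0  -- Python raises ValueError here; excluded by Pre_
  else (PySem.List.pyRange 1 (n + 1) 1).foldl pvStepB 1

-- ===== PRECONDITION & SPEC =====
-- A raises ValueError for n < 0; exactly those inputs are excluded.
def Pre_derangement_optimized (n : Int) : Prop := 0 ≤ n
instance (n : Int) : Decidable (Pre_derangement_optimized n) := by unfold Pre_derangement_optimized; infer_instance

def pvWitness_derangement_optimized : Int := (5)

def Spec_derangement_optimized (n : Int) (out : Int) : Prop := out = derangement_optimized_alt n
instance (n : Int) (out : Int) : Decidable (Spec_derangement_optimized n out) := by unfold Spec_derangement_optimized; infer_instance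

-- ===== CLAIM (what is proved, stated in full; the proofs are below) =====
def Claim_equal_derangement_optimized : Prop := ∀ (n : Int), Dom_derangement_optimized n → Pre_derangement_optimized n → Spec_derangement_optimized n (derangement_optimized n)

-- ===== LEMMAS AND PROOFS =====

-- recursive views of the two folds
def pvAF : Nat → Int × Int × Int
  | 0 => (1, 0, 0)
  | m + 1 => pvStepA (pvAF m) (2 + m)

def pvBF : Nat → Int
  | 0 => 1
  | m + 1 => pvStepB (pvBF m) (1 + m)

lemma pvFoldA (m : Nat) :
    (PySem.List.pyRange 2 (2 + (m : Int)) 1).foldl pvStepA (1, 0, 0) = pvAF m := by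
  induction m with
  | zero => simp [PySem.List.pyRange_one_eq_nil, pvAF]
  | succ k ih =>
    have h : (2 : Int) + ((k : Int) + 1) = (2 + (k : Int)) + 1 := by ring
    push_cast
    rw [h, PySem.List.pyRange_one_succ_right (by omega)]
    simp [List.foldl_append, ih, pvAF]

lemma pvFoldB (m : Nat) :
    (PySem.List.pyRange 1 (1 + (m : Int)) 1).foldl pvStepB 1 = pvBF m := by
  induction m with
  | zero => simp [PySem.List.pyRange_one_eq_nil, pvBF]
  | succ k ih =>
    have h : (1 : Int) + ((k : Int) + 1) = (1 + (k : Int)) + 1 := by ring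
    push_cast
    rw [h, PySem.List.pyRange_one_succ_right (by omega)]
    simp [List.foldl_append, ih, pvBF]

-- the two sign terms of consecutive indices add to MOD
lemma pvSign_add (i : Int) :
    (if i % 2 = 0 then (1 : Int) else MOD - 1) + (if (i + 1) % 2 = 0 then (1 : Int) else MOD - 1) = MOD := by
  rcases Int.emod_two_eq i with h | h
  · have h2 : (i + 1) % 2 = 1 := by omega
    simp [h, h2]
  · have h2 : (i + 1) % 2 = 0 := by omega
    simp [h, h2]

-- invariant: A's pair (a, b) is (D(m), D(m+1)) as computed by B
lemma pvInv (m : Nat) : (pvAF m).1 = pvBF m ∧ (pvAF m).2.1 = pvBF (m + 1) := by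
  induction m with
  | zero =>
    refine ⟨rfl, ?_⟩
    show (0 : Int) = pvStepB 1 1
    norm_num [pvStepB, MOD]
  | succ k ih =>
    obtain ⟨h1, h2⟩ := ih
    refine ⟨h2, ?_⟩
    show ((2 + (k : Int)) - 1) * ((pvAF k).1 + (pvAF k).2.1) % MOD = pvBF (k + 2)
    rw [h1, h2]
    show ((2 + (k : Int)) - 1) * (pvBF k + pvBF (k + 1)) % MOD
        = ((1 + ((k : Int) + 1)) * pvBF (k + 1) + (if (1 + ((k : Int) + 1)) % 2 = 0 then (1 : Int) else MOD - 1)) % MOD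
    set s1 : Int := (if (1 + (k : Int)) % 2 = 0 then (1 : Int) else MOD - 1) with hs1
    set s2 : Int := (if (1 + ((k : Int) + 1)) % 2 = 0 then (1 : Int) else MOD - 1) with hs2
    have hsum : s1 + s2 = MOD := by
      rw [hs1, hs2, show (1 : Int) + ((k : Int) + 1) = (1 + (k : Int)) + 1 from by ring]
      exact pvSign_add (1 + (k : Int))
    have hB : pvBF (k + 1) = ((1 + (k : Int)) * pvBF k + s1) % MOD := rfl
    have hmod : pvBF (k + 1) ≡ (1 + (k : Int)) * pvBF k + s1 [ZMOD MOD] := by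
      rw [hB]; exact Int.emod_emod_of_dvd _ dvd_rfl
    have key : (1 + ((k : Int) + 1)) * pvBF (k + 1) + s2
        ≡ ((2 + (k : Int)) - 1) * (pvBF k + pvBF (k + 1)) [ZMOD MOD] := by
      calc (1 + ((k : Int) + 1)) * pvBF (k + 1) + s2
          = (1 + (k : Int)) * pvBF (k + 1) + pvBF (k + 1) + s2 := by ring
        _ ≡ (1 + (k : Int)) * pvBF (k + 1) + ((1 + (k : Int)) * pvBF k + s1) + s2 [ZMOD MOD] := by
            exact Int.ModEq.add_right s2 (Int.ModEq.add_left _ hmod)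
        _ = ((2 + (k : Int)) - 1) * (pvBF k + pvBF (k + 1)) + (s1 + s2) := by ring
        _ = ((2 + (k : Int)) - 1) * (pvBF k + pvBF (k + 1)) + MOD := by rw [hsum]
        _ ≡ ((2 + (k : Int)) - 1) * (pvBF k + pvBF (k + 1)) + 0 [ZMOD MOD] := by
            exact Int.ModEq.add_left _ (Int.modEq_zero_iff_dvd.mpr dvd_rfl)
        _ = ((2 + (k : Int)) - 1) * (pvBF k + pvBF (k + 1)) := by ring
    exact key.symm

-- ===== VERDICT (by name: the statement is the Claim_ definition above) =====
theorem derangement_optimized_spec : Claim_equal_derangement_optimized := by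
  intro n _ hpre
  show derangement_optimized n = derangement_optimized_alt n
  obtain ⟨m, rfl⟩ : ∃ m : Nat, n = (m : Int) := ⟨n.toNat, (Int.toNat_of_nonneg hpre).symm⟩
  rcases m with _ | _ | t
  · decide
  · decide
  · have hA : derangement_optimized ((t + 2 : Nat) : Int) = (pvAF (t + 1)).2.2 := by
      unfold derangement_optimized
      rw [if_neg (by push_cast; omega), if_neg (by push_cast; omega), if_neg (by push_cast; omega)]
      have h : ((t + 2 : Nat) : Int) + 1 = 2 + ((t + 1 : Nat) : Int) := by push_cast; ring
      rw [h, pvFoldA]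
    have hB : derangement_optimized_alt ((t + 2 : Nat) : Int) = pvBF (t + 2) := by
      unfold derangement_optimized_alt
      rw [if_neg (by push_cast; omega)]
      have h : ((t + 2 : Nat) : Int) + 1 = 1 + ((t + 2 : Nat) : Int) := by ring
      rw [h, pvFoldB]
    rw [hA, hB]
    have h22 : (pvAF (t + 1)).2.2 = (pvAF (t + 1)).2.1 := rfl
    rw [h22]
    exact (pvInv (t + 1)).2
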